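-- pv_equiv track=rewrite | github.com/kbase/cdm-data-loaders | src/cdm_data_loader_utils/parsers/refseq/api/annotation_report.py | unique_annotations
-- ===== SOURCE A (Python) =====
-- def unique_annotations(data: dict):
--     seen = set()
--     for report in data.get("reports", []):
--         ann = report.get("annotation", {})
--         gene_id = ann.get("gene_id")
--         if gene_id and gene_id not in seen:
--             seen.add(gene_id)
--             yield gene_id, ann
-- ===== SOURCE B (Python) =====
-- def unique_annotations(data: dict):
--     # Recursive "nub": dedup the tail first, then prepend the head and filter
--     # its gene_id out of the tail's result. No seen-set, no dict memory.
--     anns = [r.get("annotation", {}) for r in data.get("reports", [])]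
--
--     def go(rest):
--         if not rest:
--             return []
--         ann, tail = rest[0], go(rest[1:])
--         gid = ann.get("gene_id")
--         if gid:
--             return [(gid, ann)] + [p for p in tail if p[0] != gid]
--         return tail
--
--     yield from go(anns)
-- ===== Notes on version B (the rewrite author's own statement) =====
-- stated objective: alternative
-- what changed: Replaces the stateful seen-set forward scan with a memoryless recursive nub: dedup the tail recursively, then prepend the head annotation and filter its gene_id out of the downstream result (back-to-front construction, no seen set).
import Mathlib
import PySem

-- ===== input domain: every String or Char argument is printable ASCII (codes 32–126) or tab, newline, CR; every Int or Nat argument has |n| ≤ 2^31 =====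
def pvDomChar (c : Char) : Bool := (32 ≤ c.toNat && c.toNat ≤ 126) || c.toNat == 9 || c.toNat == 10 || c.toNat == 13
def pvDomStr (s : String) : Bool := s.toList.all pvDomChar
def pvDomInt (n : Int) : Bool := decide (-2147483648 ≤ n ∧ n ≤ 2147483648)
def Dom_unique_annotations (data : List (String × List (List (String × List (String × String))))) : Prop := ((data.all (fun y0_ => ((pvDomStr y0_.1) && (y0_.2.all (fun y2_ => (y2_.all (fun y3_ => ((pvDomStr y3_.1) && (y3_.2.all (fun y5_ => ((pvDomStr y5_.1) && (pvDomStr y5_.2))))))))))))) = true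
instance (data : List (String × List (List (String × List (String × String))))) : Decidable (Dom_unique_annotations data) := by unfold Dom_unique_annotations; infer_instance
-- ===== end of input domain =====

-- B replaces A's stateful seen-set forward scan with a memoryless recursive nub
-- (dedup the tail, then prepend the head and filter its gene_id downstream); same values, same order (alternative decomposition).

-- ===== PORT A =====
-- A: seen-set + incremental output list, one forward pass.
def unique_annotations (data : List (String × List (List (String × List (String × String))))) : List (String × (List (String × String))) :=
  (((PySem.Dict.mk data).getD "reports" []).foldl
    (fun (st : PySem.Set String × List (String × List (String × String))) report =>
      let ann := (PySem.Dict.mk report).getD "annotation" []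
      match (PySem.Dict.mk ann).get? "gene_id" with
      | none => st
      | some gid =>
        if gid ≠ "" && !(PySem.Set.contains st.1 gid) then
          (PySem.Set.add st.1 gid, st.2 ++ [(gid, ann)])
        else st)
    (PySem.Set.empty, [])).2

-- ===== PORT B =====
-- B helper: recursive nub on the extracted annotation list (Source B's `go`).
def uaGo : List (List (String × String)) → List (String × List (String × String))
  | [] => []
  | ann :: rest =>
    let tail := uaGo rest
    match (PySem.Dict.mk ann).get? "gene_id" with
    | none => tail
    | some gid =>
      if gid ≠ "" then (gid, ann) :: tail.filter (fun p => p.1 ≠ gid) else tail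

-- B: extract annotations, then recursively dedup back-to-front.
def unique_annotations_alt (data : List (String × List (List (String × List (String × String))))) : List (String × (List (String × String))) :=
  let anns := ((PySem.Dict.mk data).getD "reports" []).map
    (fun r => (PySem.Dict.mk r).getD "annotation" [])
  uaGo anns

-- ===== PRECONDITION & SPEC =====
def Spec_unique_annotations (data : List (String × List (List (String × List (String × String))))) (out : List (String × (List (String × String)))) : Prop := out = unique_annotations_alt data
instance (data : List (String × List (List (String × List (String × String))))) (out : List (String × (List (String × String)))) : Decidable (Spec_unique_annotations data out) := by unfold Spec_unique_annotations; infer_instance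

-- ===== CLAIM (what is proved, stated in full; the proofs are below) =====
def Claim_equal_unique_annotations : Prop := ∀ (data : List (String × List (List (String × List (String × String))))), Dom_unique_annotations data → Spec_unique_annotations data (unique_annotations data)

-- ===== LEMMAS AND PROOFS =====

-- Invariant: A's fold from state (S, acc) over reports equals acc ++ B's nub
-- of these reports' annotations with the gids already in S filtered out.
theorem fold_eq_go (reports : List (List (String × List (String × String))))
    (S : PySem.Set String) (acc : List (String × List (String × String))) :
    (reports.foldl
      (fun (st : PySem.Set String × List (String × List (String × String))) report =>
        let ann := (PySem.Dict.mk report).getD "annotation" []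
        match (PySem.Dict.mk ann).get? "gene_id" with
        | none => st
        | some gid =>
          if gid ≠ "" && !(PySem.Set.contains st.1 gid) then
            (PySem.Set.add st.1 gid, st.2 ++ [(gid, ann)])
          else st)
      (S, acc)).2
    = acc ++ (uaGo (reports.map (fun r => (PySem.Dict.mk r).getD "annotation" []))).filter
        (fun p => !(PySem.Set.contains S p.1)) := by
  induction reports generalizing S acc with
  | nil => simp [uaGo]
  | cons r rs ih =>
    simp only [List.foldl_cons, List.map_cons, uaGo]
    cases hg : (PySem.Dict.mk ((PySem.Dict.mk r).getD "annotation" [])).get? "gene_id" with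
    | none => exact ih S acc
    | some gid =>
      dsimp only
      by_cases hne : gid = ""
      · rw [if_neg (by simp [hne]), if_neg (by simp [hne])]
        exact ih S acc
      · by_cases hc : gid ∈ S
        · rw [if_neg (by simp [hc]), if_pos (by simp [hne])]
          rw [ih S acc, List.filter_cons, if_neg (by simp [hc]), List.filter_filter]
          congr 1
          apply List.filter_congr
          intro p _
          by_cases h1 : p.1 ∈ S
          · simp [h1]
          · have h2 : ¬p.1 = gid := fun h => h1 (h ▸ hc)
            simp [h1, h2]
        · rw [if_pos (by simp [hne, hc]), if_pos (by simp [hne])]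
          rw [ih (PySem.Set.add S gid) (acc ++ [(gid, (PySem.Dict.mk r).getD "annotation" [])])]
          rw [List.filter_cons, if_pos (by simp [hc]), List.filter_filter, List.append_assoc,
            List.singleton_append]
          congr 2
          apply List.filter_congr
          intro p _
          by_cases h1 : p.1 ∈ S <;> by_cases h2 : p.1 = gid <;>
            simp [PySem.Set.mem_add, h1, h2]

-- Post-composition: filtering with the empty seen set is the identity.
theorem filter_empty_eq (xs : List (String × List (String × String))) :
    xs.filter (fun p => !(PySem.Set.contains PySem.Set.empty p.1)) = xs := by
  apply List.filter_eq_self.mpr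
  intro p _
  simp [PySem.Set.contains, PySem.Set.empty]

-- ===== VERDICT (by name: the statement is the Claim_ definition above) =====
theorem unique_annotations_spec : Claim_equal_unique_annotations := by
  intro data _
  unfold Spec_unique_annotations unique_annotations unique_annotations_alt
  rw [fold_eq_go _ PySem.Set.empty [], filter_empty_eq]
  simp
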